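-- pv_equiv track=rewrite | github.com/john-thuo1/stopes | stopes/pipelines/asr_bleu/compute_asr_bleu.py | merge_tailo_init_final
-- ===== SOURCE A (Python) =====
-- def merge_tailo_init_final(text):
--     """
--     Hokkien ASR hypothesis post-processing.
--     """
--     sps = text.strip().split()
--     results = []
--     last_syllable = ""
--     for sp in sps:
--         if sp == "NULLINIT" or sp == "nullinit":
--             continue
--         last_syllable += sp
--         if sp[-1].isnumeric():
--             results.append(last_syllable)
--             last_syllable = ""
--     if last_syllable != "":
--         results.append(last_syllable)
--     return " ".join(results)
-- ===== SOURCE B (Python) =====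
-- def merge_tailo_init_final(text):
--     """
--     Hokkien ASR hypothesis post-processing.
--     """
--     sps = [sp for sp in text.strip().split() if sp not in ("NULLINIT", "nullinit")]
--     bounds = [i + 1 for i, sp in enumerate(sps) if sp[-1].isnumeric()]
--     words = []
--     start = 0
--     for b in bounds:
--         words.append("".join(sps[start:b]))
--         start = b
--     if start < len(sps):
--         words.append("".join(sps[start:]))
--     return " ".join(words)
-- ===== Notes on version B (the rewrite author's own statement) =====
-- stated objective: alternative
-- what changed: B first filters out the NULLINIT tokens, computes the list of word-end boundary positions (indices after digit-final syllables), and then forms each word by slicing and joining the token list between consecutive boundaries, instead of A's single pass that accumulates a growing last_syllable string.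
import Mathlib
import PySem

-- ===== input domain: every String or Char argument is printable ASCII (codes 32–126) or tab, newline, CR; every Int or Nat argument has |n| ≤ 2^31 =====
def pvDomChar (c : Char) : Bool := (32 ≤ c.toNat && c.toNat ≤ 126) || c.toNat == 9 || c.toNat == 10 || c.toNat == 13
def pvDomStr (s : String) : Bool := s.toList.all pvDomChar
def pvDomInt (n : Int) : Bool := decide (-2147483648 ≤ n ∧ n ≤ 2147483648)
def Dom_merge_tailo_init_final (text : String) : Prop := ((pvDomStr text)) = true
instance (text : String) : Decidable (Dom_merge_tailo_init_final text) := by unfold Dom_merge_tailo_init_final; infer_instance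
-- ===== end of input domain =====

-- B merges syllables by first computing the word-end boundary positions and then slicing, instead of
-- A's accumulate-on-the-fly pass; same cost, different decomposition ('alternative').

-- ===== PORT A =====
-- sp[-1].isnumeric(): on the ASCII domain isnumeric agrees with isdigit; pyGet? (-1) is exact
-- (tokens from split() are nonempty, so the IndexError case never arises).
def pvDigLast (sp : List Char) : Bool :=
  ((PySem.List.pyGet? sp (-1)).map PySem.Chars.isdigit).getD false

def pvALoop : List (List Char) → List (List Char) → List Char → List (List Char)
  | [], results, last => if last ≠ [] then results ++ [last] else results
  | sp :: rest, results, last =>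
    if sp = "NULLINIT".toList ∨ sp = "nullinit".toList then
      pvALoop rest results last
    else
      let last' := last ++ sp
      if pvDigLast sp then pvALoop rest (results ++ [last']) []
      else pvALoop rest results last'

def merge_tailo_init_final (text : String) : String :=
  String.mk (PySem.Chars.join " ".toList
    (pvALoop (PySem.Chars.split₀ (PySem.Chars.strip text.toList)) [] []))

-- ===== PORT B =====
def pvKeep (sp : List Char) : Bool := !(decide (sp = "NULLINIT".toList ∨ sp = "nullinit".toList))

-- the 'for b in bounds' loop, state (words, start)
def pvBLoop (sps : List (List Char)) : List Int → List (List Char) → Int → List (List Char) × Int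
  | [], words, start => (words, start)
  | b :: bs, words, start =>
    pvBLoop sps bs (words ++ [PySem.Chars.join [] (PySem.List.slice sps (some start) (some b))]) b

-- bounds, then the word-forming loop, then the unterminated tail
def pvBWords (sps : List (List Char)) : List (List Char) :=
  let bounds := ((PySem.List.enumerate sps).filter (fun p => pvDigLast p.2)).map (fun p => p.1 + 1)
  let ws := pvBLoop sps bounds [] 0
  if ws.2 < (sps.length : Int) then
    ws.1 ++ [PySem.Chars.join [] (PySem.List.slice sps (some ws.2) none)]
  else ws.1

def merge_tailo_init_final_alt (text : String) : String :=
  String.mk (PySem.Chars.join " ".toList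
    (pvBWords ((PySem.Chars.split₀ (PySem.Chars.strip text.toList)).filter pvKeep)))

-- ===== PRECONDITION & SPEC =====
def Spec_merge_tailo_init_final (text : String) (out : String) : Prop := out = merge_tailo_init_final_alt text
instance (text : String) (out : String) : Decidable (Spec_merge_tailo_init_final text out) := by unfold Spec_merge_tailo_init_final; infer_instance

-- ===== CLAIM (what is proved, stated in full; the proofs are below) =====
def Claim_equal_merge_tailo_init_final : Prop := ∀ (text : String), Dom_merge_tailo_init_final text → Spec_merge_tailo_init_final text (merge_tailo_init_final text)

-- ===== LEMMAS AND PROOFS =====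

-- canonical grouping of the (already filtered) syllables, pending word `last`
def pvGroup : List (List Char) → List Char → List (List Char)
  | [], last => if last = [] then [] else [last]
  | sp :: rest, last => if pvDigLast sp then (last ++ sp) :: pvGroup rest [] else pvGroup rest (last ++ sp)

-- prepend `last` to the first word (or emit it alone if there is none)
def pvConsMerge (last : List Char) : List (List Char) → List (List Char)
  | [] => if last = [] then [] else [last]
  | w :: ws => (last ++ w) :: ws

-- boundary positions, Nat form
def pvBnds : List (List Char) → List Nat
  | [] => []
  | sp :: rest => if pvDigLast sp then 1 :: (pvBnds rest).map (· + 1) else (pvBnds rest).map (· + 1)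

-- B's word list, Nat form
def pvBWn (sps : List (List Char)) : List Nat → Nat → List (List Char)
  | [], s => if s < sps.length then [PySem.Chars.join [] (sps.drop s)] else []
  | b :: bs, s => PySem.Chars.join [] ((sps.drop s).take (b - s)) :: pvBWn sps bs b

-- Int-level word list and final start of pvBLoop
def pvWordsI (sps : List (List Char)) : List Int → Int → List (List Char)
  | [], _ => []
  | b :: bs, s => PySem.Chars.join [] (PySem.List.slice sps (some s) (some b)) :: pvWordsI sps bs b

def pvEndI : List Int → Int → Int
  | [], s => s
  | b :: bs, _ => pvEndI bs b

lemma pv_join_nil_cons (x : List Char) (l : List (List Char)) :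
    PySem.Chars.join [] (x :: l) = x ++ PySem.Chars.join [] l := by
  cases l with
  | nil => simp [PySem.Chars.join, List.intercalate]
  | cons y l => simp [PySem.Chars.join, List.intercalate]

lemma pv_split₀_go_ne_nil (s cur : List Char) (acc : List (List Char))
    (hacc : ∀ t ∈ acc, t ≠ []) : ∀ sp ∈ PySem.Chars.split₀.go s cur acc, sp ≠ [] := by
  induction s generalizing cur acc with
  | nil =>
    intro sp hsp
    unfold PySem.Chars.split₀.go at hsp
    by_cases hc : cur.isEmpty
    · rw [if_pos hc] at hsp
      exact hacc sp (List.mem_reverse.mp hsp)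
    · rw [if_neg hc] at hsp
      rcases List.mem_cons.mp (List.mem_reverse.mp hsp) with h | h
      · subst h
        simp only [List.isEmpty_iff] at hc
        simpa [List.reverse_eq_nil_iff] using hc
      · exact hacc sp h
  | cons c rest ih =>
    intro sp hsp
    unfold PySem.Chars.split₀.go at hsp
    by_cases hs : PySem.Chars.isspace c
    · rw [if_pos hs] at hsp
      by_cases hc : cur.isEmpty
      · rw [if_pos hc] at hsp
        exact ih [] acc hacc sp hsp
      · rw [if_neg hc] at hsp
        refine ih [] _ ?_ sp hsp
        intro t ht
        rcases List.mem_cons.mp ht with h | h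
        · subst h
          simp only [List.isEmpty_iff] at hc
          simpa [List.reverse_eq_nil_iff] using hc
        · exact hacc t h
    · rw [if_neg hs] at hsp
      exact ih (c :: cur) acc hacc sp hsp

lemma pv_tokens_ne_nil (cs : List Char) :
    ∀ sp ∈ (PySem.Chars.split₀ cs).filter pvKeep, sp ≠ [] := by
  intro sp hsp
  have h := (List.mem_filter.mp hsp).1
  unfold PySem.Chars.split₀ at h
  exact pv_split₀_go_ne_nil cs [] [] (by simp) sp h

lemma pv_aloop_eq (toks : List (List Char)) : ∀ res last,
    pvALoop toks res last = res ++ pvGroup (toks.filter pvKeep) last := by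
  induction toks with
  | nil => intro res last; by_cases h : last = [] <;> simp [pvALoop, pvGroup, h]
  | cons sp rest ih =>
    intro res last
    by_cases h : sp = "NULLINIT".toList ∨ sp = "nullinit".toList
    · have hk : pvKeep sp = false := by
        unfold pvKeep
        simp only [Bool.not_eq_false', decide_eq_true_eq]
        exact h
      simp only [pvALoop]
      rw [if_pos h, ih, List.filter_cons, hk]
      simp
    · have hk : pvKeep sp = true := by
        unfold pvKeep
        simp only [Bool.not_eq_true', decide_eq_false_iff_not]
        exact h
      simp only [pvALoop]
      rw [if_neg h]
      by_cases hd : pvDigLast sp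
      · rw [if_pos hd, ih, List.filter_cons, hk]
        simp [pvGroup, hd]
      · rw [if_neg hd, ih, List.filter_cons, hk]
        simp [pvGroup, hd]

lemma pv_bloop_eq (sps : List (List Char)) : ∀ (bs : List Int) (ws : List (List Char)) (s : Int),
    pvBLoop sps bs ws s = (ws ++ pvWordsI sps bs s, pvEndI bs s) := by
  intro bs
  induction bs with
  | nil => intro ws s; simp [pvBLoop, pvWordsI, pvEndI]
  | cons b bs ih => intro ws s; simp [pvBLoop, pvWordsI, pvEndI, ih]

lemma pv_int_nat (sps : List (List Char)) : ∀ (bs : List Nat) (s : Nat),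
    pvWordsI sps (List.map (fun (n : Nat) => (n : Int)) bs) (s : Int) ++
      (if pvEndI (List.map (fun (n : Nat) => (n : Int)) bs) (s : Int) < (sps.length : Int) then
        [PySem.Chars.join []
          (PySem.List.slice sps (some (pvEndI (List.map (fun (n : Nat) => (n : Int)) bs) (s : Int))) none)]
      else []) = pvBWn sps bs s := by
  intro bs
  induction bs with
  | nil =>
    intro s
    simp [pvWordsI, pvEndI, pvBWn, PySem.List.slice_from_natCast, Nat.cast_lt]
  | cons b bs ih =>
    intro s
    simp only [List.map_cons, pvWordsI, pvEndI, pvBWn, List.cons_append,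
      PySem.List.slice_natCast, ih b]

-- shift: bounds and start both +1 on a cons'd token list
lemma pv_bwn_shift (sp : List Char) (sps : List (List Char)) :
    ∀ (bs : List Nat) (s : Nat), pvBWn (sp :: sps) (bs.map (· + 1)) (s + 1) = pvBWn sps bs s := by
  intro bs
  induction bs with
  | nil => intro s; simp [pvBWn, Nat.succ_lt_succ_iff]
  | cons b bs ih =>
    intro s
    simp [pvBWn, Nat.succ_sub_succ, ih b]

lemma pv_consMerge_nil (ws : List (List Char)) : pvConsMerge [] ws = ws := by
  cases ws <;> simp [pvConsMerge]

lemma pv_consMerge_consMerge (last sp : List Char) (hsp : sp ≠ []) (ws : List (List Char)) :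
    pvConsMerge last (pvConsMerge sp ws) = pvConsMerge (last ++ sp) ws := by
  cases ws with
  | nil => simp [pvConsMerge, hsp]
  | cons w ws => simp [pvConsMerge]

-- B on a cons'd (non-digit-final) token = prepend it to the first word
lemma pv_bwn_cons (sp : List Char) (hsp : sp ≠ []) (sps : List (List Char)) (bs : List Nat) :
    pvBWn (sp :: sps) (bs.map (· + 1)) 0 = pvConsMerge sp (pvBWn sps bs 0) := by
  cases bs with
  | nil =>
    cases sps with
    | nil => simp [pvBWn, pvConsMerge, hsp]
    | cons t ts => simp [pvBWn, pvConsMerge, pv_join_nil_cons]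
  | cons b bs =>
    have h1 : pvBWn (sp :: sps) (bs.map (· + 1)) (b + 1) = pvBWn sps bs b := pv_bwn_shift sp sps bs b
    simp [pvBWn, pv_join_nil_cons, pvConsMerge, h1]

-- the enumerate/filter/map bounds equal pvBnds (shifted by the start index)
lemma pv_bounds_eq (sps : List (List Char)) : ∀ (s : Int),
    ((PySem.List.enumerate sps s).filter (fun p => pvDigLast p.2)).map (fun p => p.1 + 1)
      = (pvBnds sps).map (fun (n : Nat) => (n : Int) + s) := by
  induction sps with
  | nil => intro s; simp [PySem.List.enumerate, pvBnds]
  | cons sp rest ih =>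
    intro s
    by_cases hd : pvDigLast sp
    · simp only [PySem.List.enumerate_cons, List.filter_cons, hd, if_true, List.map_cons,
        ih (s + 1), pvBnds, List.map_map]
      congr 1
      · push_cast; ring
      · apply List.map_congr_left
        intro n _
        simp only [Function.comp_apply]
        push_cast
        ring
    · simp only [PySem.List.enumerate_cons, List.filter_cons, hd, Bool.false_eq_true, if_false,
        ih (s + 1), pvBnds, List.map_map]
      apply List.map_congr_left
      intro n _
      simp only [Function.comp_apply]
      push_cast
      ring

-- main: the grouping pass equals the boundary-slicing word list, pending word prepended
lemma pv_group_eq_bwn : ∀ (sps : List (List Char)), (∀ sp ∈ sps, sp ≠ []) → ∀ (last : List Char),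
    pvGroup sps last = pvConsMerge last (pvBWn sps (pvBnds sps) 0) := by
  intro sps
  induction sps with
  | nil => intro _ last; simp [pvGroup, pvBnds, pvBWn, pvConsMerge]
  | cons sp rest ih =>
    intro h last
    have hsp : sp ≠ [] := h sp (by simp)
    have hrest : ∀ t ∈ rest, t ≠ [] := fun t ht => h t (by simp [ht])
    by_cases hd : pvDigLast sp
    · have h1 : pvBWn (sp :: rest) ((pvBnds rest).map (· + 1)) (0 + 1) = pvBWn rest (pvBnds rest) 0 :=
        pv_bwn_shift sp rest (pvBnds rest) 0
      simp only [pvGroup, hd, if_true, pvBnds]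
      rw [ih hrest [], pv_consMerge_nil]
      simp only [pvBWn, List.drop_zero, List.take_one, Nat.sub_zero]
      rw [show (1 : Nat) + 0 = 0 + 1 by omega] at *
      simp [pvConsMerge, h1]
    · simp only [pvGroup, hd, Bool.false_eq_true, if_false, pvBnds]
      rw [ih hrest (last ++ sp), pv_bwn_cons sp hsp rest (pvBnds rest),
        pv_consMerge_consMerge last sp hsp]

lemma pv_bwords_eq (sps : List (List Char)) : pvBWords sps = pvBWn sps (pvBnds sps) 0 := by
  have hb : ((PySem.List.enumerate sps).filter (fun p => pvDigLast p.2)).map (fun p => p.1 + 1)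
      = List.map (fun (n : Nat) => (n : Int)) (pvBnds sps) := by
    rw [pv_bounds_eq sps 0]
    apply List.map_congr_left
    intro n _
    omega
  have h4 := pv_int_nat sps (pvBnds sps) 0
  simp only [Nat.cast_zero] at h4
  unfold pvBWords
  simp only [hb, pv_bloop_eq, List.nil_append]
  rw [← h4]
  by_cases hc : pvEndI (List.map (fun (n : Nat) => (n : Int)) (pvBnds sps)) 0 < (sps.length : Int)
  · simp [hc]
  · simp [hc]

-- ===== VERDICT (by name: the statement is the Claim_ definition above) =====
theorem merge_tailo_init_final_spec : Claim_equal_merge_tailo_init_final := by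
  intro text _
  unfold Spec_merge_tailo_init_final merge_tailo_init_final merge_tailo_init_final_alt
  rw [pv_aloop_eq, List.nil_append, pv_bwords_eq,
    pv_group_eq_bwn _ (pv_tokens_ne_nil _) [], pv_consMerge_nil]
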